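-- pv_equiv track=rewrite | github.com/masmeert/advent-of-code | 2021/refractor.py | dive
-- ===== SOURCE A (Python) =====
-- from typing import List, Tuple
--
-- def dive(data: List[Tuple[str, int]], part: int) -> int:
--     """
--     DAY02 part 1 & 2
--     """
--     fwd = depth = aim = 0
--     for x in data:
--         if x[0] == "forward":
--             fwd += x[1]
--             depth += x[1] * aim
--         else:
--             aim += -x[1] if x[0] == "up" else x[1]
--     return fwd * (depth if part == 2 else aim)
-- ===== SOURCE B (Python) =====
-- from typing import List, Tuple
--
-- def dive(data: List[Tuple[str, int]], part: int) -> int: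
--     if part == 2:
--         aim = fwd = depth = 0
--         for c, v in data:
--             if c == "forward":
--                 fwd += v
--                 depth += v * aim
--             else:
--                 aim += -v if c == "up" else v
--         return fwd * depth
--     fwd = sum(v for c, v in data if c == "forward")
--     vert = sum(-v if c == "up" else v for c, v in data if c != "forward")
--     return fwd * vert
-- ===== Notes on version B (the rewrite author's own statement) =====
-- stated objective: alternative
-- what changed: Branches on part first: part 1 becomes an order-independent product of two separate filtered sums (forward distances times signed vertical commands) with no interleaved state, while part 2 keeps a running-aim fold; A uses one interleaved three-accumulator loop for both parts.
import Mathlib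
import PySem

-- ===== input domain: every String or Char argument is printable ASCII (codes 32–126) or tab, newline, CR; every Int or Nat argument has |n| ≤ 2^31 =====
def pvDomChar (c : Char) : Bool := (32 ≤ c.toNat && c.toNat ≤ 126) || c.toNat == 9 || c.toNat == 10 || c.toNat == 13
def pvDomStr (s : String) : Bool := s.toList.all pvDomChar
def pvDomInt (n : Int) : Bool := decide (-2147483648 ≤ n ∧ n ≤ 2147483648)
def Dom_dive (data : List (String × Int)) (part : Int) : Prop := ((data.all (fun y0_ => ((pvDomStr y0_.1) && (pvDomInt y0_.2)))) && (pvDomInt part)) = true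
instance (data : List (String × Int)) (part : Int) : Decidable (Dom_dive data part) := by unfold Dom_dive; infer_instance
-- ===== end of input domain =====

-- B branches on part: part 1 is a product of two separate filtered sums (order-independent),
-- part 2 keeps a running-aim fold; same values as A everywhere, no speed claim.


-- ===== PORT A =====
-- A's single loop over (fwd, depth, aim)
def diveLoopA : List (String × Int) → Int × Int × Int → Int × Int × Int
  | [], s => s
  | x :: xs, (fwd, depth, aim) =>
    if x.1 == "forward" then
      diveLoopA xs (fwd + x.2, depth + x.2 * aim, aim)
    else
      diveLoopA xs (fwd, depth, aim + (if x.1 == "up" then -x.2 else x.2))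

def dive (data : List (String × Int)) (part : Int) : Int :=
  let s := diveLoopA data (0, 0, 0)
  s.1 * (if part == 2 then s.2.1 else s.2.2)

-- ===== PORT B =====
-- B's part-2 loop over (aim, fwd, depth)
def diveLoopB : List (String × Int) → Int × Int × Int → Int × Int × Int
  | [], s => s
  | (c, v) :: xs, (aim, fwd, depth) =>
    if c == "forward" then
      diveLoopB xs (aim, fwd + v, depth + v * aim)
    else
      diveLoopB xs (aim + (if c == "up" then -v else v), fwd, depth)

def dive_alt (data : List (String × Int)) (part : Int) : Int :=
  if part == 2 then
    let s := diveLoopB data (0, 0, 0)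
    s.2.1 * s.2.2
  else
    let fwd := ((data.filter (fun y => y.1 == "forward")).map (fun y => y.2)).sum
    let vert := ((data.filter (fun y => y.1 != "forward")).map
      (fun y => if y.1 == "up" then -y.2 else y.2)).sum
    fwd * vert

-- ===== PRECONDITION & SPEC =====
def Spec_dive (data : List (String × Int)) (part : Int) (out : Int) : Prop := out = dive_alt data part
instance (data : List (String × Int)) (part : Int) (out : Int) : Decidable (Spec_dive data part out) := by unfold Spec_dive; infer_instance

-- ===== CLAIM (what is proved, stated in full; the proofs are below) =====
def Claim_equal_dive : Prop := ∀ (data : List (String × Int)) (part : Int), Dom_dive data part → Spec_dive data part (dive data part)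

-- ===== LEMMAS AND PROOFS =====
theorem diveLoop_corr (data : List (String × Int)) (f d a : Int) :
    diveLoopB data (a, f, d) =
      ((diveLoopA data (f, d, a)).2.2, (diveLoopA data (f, d, a)).1, (diveLoopA data (f, d, a)).2.1) := by
  induction data generalizing f d a with
  | nil => simp [diveLoopA, diveLoopB]
  | cons x xs ih =>
    obtain ⟨c, v⟩ := x
    simp only [diveLoopA, diveLoopB]
    split_ifs <;> simp [ih]

theorem diveLoopA_fwd (data : List (String × Int)) (f d a : Int) :
    (diveLoopA data (f, d, a)).1 =
      f + ((data.filter (fun y => y.1 == "forward")).map (fun y => y.2)).sum := by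
  induction data generalizing f d a with
  | nil => simp [diveLoopA]
  | cons x xs ih =>
    simp only [diveLoopA, List.filter_cons]
    by_cases h : x.1 = "forward"
    · simp [h, ih]
      ring
    · simp [h, ih]

theorem diveLoopA_aim (data : List (String × Int)) (f d a : Int) :
    (diveLoopA data (f, d, a)).2.2 =
      a + ((data.filter (fun y => y.1 != "forward")).map
        (fun y => if y.1 == "up" then -y.2 else y.2)).sum := by
  induction data generalizing f d a with
  | nil => simp [diveLoopA]
  | cons x xs ih =>
    simp only [diveLoopA, List.filter_cons]
    by_cases h : x.1 = "forward"
    · simp [h, ih]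
    · by_cases hu : x.1 = "up" <;> simp [h, hu, ih] <;> ring

-- ===== VERDICT (by name: the statement is the Claim_ definition above) =====
theorem dive_spec : Claim_equal_dive := by
  intro data part _
  unfold Spec_dive dive dive_alt
  by_cases hp : part == 2
  · simp only [hp, if_true, diveLoop_corr]
  · simp [hp, diveLoopA_fwd data 0 0 0, diveLoopA_aim data 0 0 0]
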